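-- pv_equiv track=rewrite | github.com/Nikkuniku/AtcoderProgramming | ARC/ARC162/a.py | solve
-- ===== SOURCE A (Python) =====
-- def solve(m, q):
--     res = 0
--     for i, v in enumerate(q):
--         isOK = True
--         for j in range(i+1, m):
--             if v > q[j]:
--                 isOK = False
--         if isOK:
--             res += 1
--     return res
-- ===== SOURCE B (Python) =====
-- def solve(m, q):
--     # single right-to-left pass tracking the running minimum of the first-m window
--     res = 0
--     cur = None  # min of q[i+1:m] for the current i
--     i = len(q)
--     for v in reversed(q):
--         i -= 1
--         if cur is None or v <= cur:
--             res += 1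
--         if i < m and (cur is None or v < cur):
--             cur = v
--     return res
-- ===== Notes on version B (the rewrite author's own statement) =====
-- stated objective: faster
-- what changed: Replaced A's nested rescans (for each index, scanning all later indices up to m) by a single right-to-left pass that maintains the running minimum of the already-seen window, so the inner scan disappears.
import Mathlib
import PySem

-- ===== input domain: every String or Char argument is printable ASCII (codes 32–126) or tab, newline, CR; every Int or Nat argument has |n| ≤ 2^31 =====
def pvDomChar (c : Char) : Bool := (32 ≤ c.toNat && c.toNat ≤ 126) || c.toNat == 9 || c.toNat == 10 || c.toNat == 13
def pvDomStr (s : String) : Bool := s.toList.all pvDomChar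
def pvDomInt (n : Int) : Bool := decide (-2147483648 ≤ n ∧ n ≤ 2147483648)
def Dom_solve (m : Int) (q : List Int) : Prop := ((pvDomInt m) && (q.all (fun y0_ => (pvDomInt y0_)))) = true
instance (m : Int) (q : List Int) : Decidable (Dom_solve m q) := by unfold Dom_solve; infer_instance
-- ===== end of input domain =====

-- B replaces A's quadratic nested scan by a single right-to-left pass tracking the suffix minimum.


-- ===== PORT A =====
def solve (m : Int) (q : List Int) : Int :=
  (PySem.List.enumerate q 0).foldl (fun res iv =>
    let isOK := (PySem.List.pyRange (iv.1 + 1) m 1).foldl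
      (fun ok j => if iv.2 > PySem.List.pyGetD q j 0 then false else ok) true
    if isOK then res + 1 else res) 0

-- ===== PORT B =====
def solve_alt (m : Int) (q : List Int) : Int :=
  (q.reverse.foldl (fun s v =>
      let i := s.2.2 - 1
      let res := match s.2.1 with
        | none => s.1 + 1
        | some c => if v ≤ c then s.1 + 1 else s.1
      let cur := if i < m then
          match s.2.1 with
          | none => some v
          | some c => if v < c then some v else some c
        else s.2.1
      (res, cur, i))
    ((0 : Int), (none : Option Int), (q.length : Int))).1

-- ===== PRECONDITION & SPEC =====
-- Pre_ excludes exactly the inputs (q nonempty with m > len(q)) on which A's inner access q[j] raises IndexError.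
def Pre_solve (m : Int) (q : List Int) : Prop := q = [] ∨ m ≤ (q.length : Int)
instance (m : Int) (q : List Int) : Decidable (Pre_solve m q) := by unfold Pre_solve; infer_instance
def pvWitness_solve : Int × List Int := (3, [2, 1, 3])

def Spec_solve (m : Int) (q : List Int) (out : Int) : Prop := out = solve_alt m q
instance (m : Int) (q : List Int) (out : Int) : Decidable (Spec_solve m q out) := by unfold Spec_solve; infer_instance

-- ===== CLAIM (what is proved, stated in full; the proofs are below) =====
def Claim_equal_solve : Prop := ∀ (m : Int) (q : List Int), Dom_solve m q → Pre_solve m q → Spec_solve m q (solve m q)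

-- ===== LEMMAS AND PROOFS =====

-- Cnt m i l : reference count on the suffix l = q[i:] — an element counts iff it is ≤ every
-- element of its window (the rest of the list up to absolute index m)
def Cnt (m : Int) : Nat → List Int → Int
  | _, [] => 0
  | i, v :: rest =>
      (if ((rest.take ((m - ((i : Int) + 1)).toNat)).all (fun x => decide (v ≤ x))) then 1 else 0) + Cnt m (i + 1) rest

-- structural form of B's right-to-left pass
def H (m : Int) : Int → List Int → Int × Option Int
  | _, [] => (0, none)
  | i, v :: rest =>
      let p := H m (i + 1) rest
      let cnt := match p.2 with
        | none => p.1 + 1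
        | some c => if v ≤ c then p.1 + 1 else p.1
      let cur := if i < m then
          match p.2 with
          | none => some v
          | some c => if v < c then some v else some c
        else p.2
      (cnt, cur)

theorem foldB_eq_H (m : Int) : ∀ (l : List Int) (r : Int) (i : Int),
    l.reverse.foldl (fun s v =>
      let i := s.2.2 - 1
      let res := match s.2.1 with
        | none => s.1 + 1
        | some c => if v ≤ c then s.1 + 1 else s.1
      let cur := if i < m then
          match s.2.1 with
          | none => some v
          | some c => if v < c then some v else some c
        else s.2.1
      (res, cur, i)) (r, (none : Option Int), i + (l.length : Int))
    = (r + (H m i l).1, (H m i l).2, i) := by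
  intro l
  induction l with
  | nil => intro r i; simp [H]
  | cons v rest ih =>
    intro r i
    have hlen : i + ((v :: rest).length : Int) = (i + 1) + (rest.length : Int) := by
      simp; ring
    rw [hlen]
    simp only [List.reverse_cons, List.foldl_append, ih r (i + 1), List.foldl_cons, List.foldl_nil]
    simp only [H]
    have h1 : (i + 1) - 1 = i := by ring
    simp only [h1]
    cases h : (H m (i + 1) rest).2 with
    | none => simp only [h]; rw [add_assoc]
    | some c => simp only [h]; split_ifs <;> simp [add_assoc]

theorem solve_alt_eq_H (m : Int) (q : List Int) : solve_alt m q = (H m 0 q).1 := by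
  unfold solve_alt
  have := foldB_eq_H m q 0 0
  rw [zero_add] at this
  rw [this]
  simp

theorem foldl_min_comm : ∀ (t : List Int) (v b : Int),
    t.foldl min (min v b) = min v (t.foldl min b) := by
  intro t
  induction t with
  | nil => intro v b; rfl
  | cons c t ih =>
    intro v b
    simp only [List.foldl_cons, min_assoc, ih]

theorem foldl_min_eq_match (v : Int) (w : List Int) :
    w.foldl min v = (match w.min? with | none => v | some c => min v c) := by
  cases w with
  | nil => rfl
  | cons b t =>
    simp only [List.min?_cons', List.foldl_cons]
    exact foldl_min_comm t v b

theorem min?_cons_eq (v : Int) (w : List Int) :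
    (v :: w).min? = some (match w.min? with | none => v | some c => min v c) := by
  rw [List.min?_cons', foldl_min_eq_match]

theorem all_le_iff_min? (v : Int) (w : List Int) :
    (w.all (fun x => decide (v ≤ x))) = (match w.min? with | none => true | some c => decide (v ≤ c)) := by
  cases h : w.min? with
  | none => rw [List.min?_eq_none_iff.mp h]; rfl
  | some c =>
    have hmem := (List.min?_eq_some_iff.mp h).1
    have hmin := (List.min?_eq_some_iff.mp h).2
    apply Bool.coe_iff_coe.mp
    simp only [List.all_eq_true, decide_eq_true_eq]
    constructor
    · intro hall; exact hall c hmem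
    · intro hv x hx; exact le_trans hv (hmin x hx)

theorem H_snd (m : Int) : ∀ (l : List Int) (i : Int),
    (H m i l).2 = (l.take ((m - i).toNat)).min? := by
  intro l
  induction l with
  | nil => intro i; simp [H]
  | cons v rest ih =>
    intro i
    simp only [H, ih (i + 1)]
    by_cases hi : i < m
    · have hk : (m - i).toNat = (m - (i + 1)).toNat + 1 := by omega
      rw [hk, List.take_succ_cons, min?_cons_eq]
      cases h : (rest.take ((m - (i + 1)).toNat)).min? with
      | none => simp [hi]
      | some c =>
        simp only [hi, if_true]
        by_cases hv : v < c
        · simp [hv, min_eq_left (le_of_lt hv)]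
        · simp [hv, min_eq_right (by omega : c ≤ v)]
    · have h0 : (m - i).toNat = 0 := by omega
      have h1 : (m - (i + 1)).toNat = 0 := by omega
      rw [h0, h1] at *
      simp [hi]

theorem H_fst (m : Int) : ∀ (l : List Int) (i : Nat),
    (H m (i : Int) l).1 = Cnt m i l := by
  intro l
  induction l with
  | nil => intro i; simp [H, Cnt]
  | cons v rest ih =>
    intro i
    have hcast : ((i : Int)) + 1 = ((i + 1 : Nat) : Int) := by push_cast; ring
    simp only [H, Cnt, hcast, ih (i + 1), H_snd m rest ((i + 1 : Nat) : Int), all_le_iff_min?]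
    cases h : (rest.take ((m - ((i + 1 : Nat) : Int)).toNat)).min? with
    | none => simp only [h]; simp [add_comm]
    | some c =>
      simp only [h]
      by_cases hv : v ≤ c
      · simp [hv, add_comm]
      · simp [hv]

theorem isOK_eq (m : Int) (q : List Int) (hm : m ≤ (q.length : Int))
    (s : Nat) (v : Int) (rest : List Int) (hdrop : q.drop s = v :: rest) :
    ((PySem.List.pyRange ((s : Int) + 1) m 1).foldl
      (fun ok j => if v > PySem.List.pyGetD q j 0 then false else ok) true)
    = (rest.take ((m - ((s : Int) + 1)).toNat)).all (fun x => decide (v ≤ x)) := by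
  have hrest : rest = q.drop (s + 1) := by
    have := congrArg List.tail hdrop
    simpa [List.tail_drop] using this.symm
  have hlen : rest.length + (s + 1) = q.length := by
    have := congrArg List.length hdrop
    simp at this
    omega
  have hstep : ∀ (ok : Bool) (j : Int), j ∈ PySem.List.pyRange ((s : Int) + 1) m 1 →
      (if v > PySem.List.pyGetD q j 0 then false else ok)
      = (if (decide (v > PySem.List.pyGetD q j 0)) then false else ok) := by
    intro ok j _; simp
  rw [PySem.List.foldl_congr_mem _ _ (fun ok j => if (decide (v > PySem.List.pyGetD q j 0)) then false else ok) _ hstep,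
      PySem.List.foldl_if_false_eq]
  apply Bool.coe_iff_coe.mp
  simp only [Bool.true_and, Bool.not_eq_eq_eq_not, Bool.not_true, List.any_eq_false,
    List.all_eq_true, decide_eq_true_eq, not_lt, PySem.List.mem_pyRange_one]
  have hidx : ∀ k : Nat, rest[k]? = q[s+1+k]? := by
    intro k; rw [hrest, List.getElem?_drop]
  constructor
  · intro hall x hx
    rcases List.mem_take_iff_getElem.mp hx with ⟨k, hk, hrx⟩
    have hk1 : k < (m - ((s : Int) + 1)).toNat := (lt_min_iff.mp hk).1
    have hk2 : k < rest.length := (lt_min_iff.mp hk).2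
    have hq1 : q[s+1+k]? = some x := by
      rw [← hidx k, List.getElem?_eq_getElem hk2, hrx]
    have hlt : s+1+k < q.length := by omega
    have hq2 : q[s+1+k]? = some (q[s+1+k]'hlt) := List.getElem?_eq_getElem hlt
    have hqx : q[s+1+k]'hlt = x := Option.some.inj (hq2.symm.trans hq1)
    have hv := hall ((s + 1 + k : Nat) : Int) ⟨by push_cast; omega, by push_cast; omega⟩
    rw [PySem.List.pyGetD_eq_getElem q 0 (by omega) (by push_cast; omega)] at hv
    simp only [Int.toNat_natCast] at hv
    rwa [hqx] at hv
  · intro hall j hj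
    obtain ⟨hj1, hj2⟩ := hj
    rw [PySem.List.pyGetD_eq_getElem q 0 (by omega) (by omega)]
    have hk2 : j.toNat - (s + 1) < rest.length := by omega
    have hx : rest[j.toNat - (s + 1)]'hk2 ∈ rest.take ((m - ((s : Int) + 1)).toNat) := by
      apply List.mem_take_iff_getElem.mpr
      exact ⟨j.toNat - (s + 1), by omega, rfl⟩
    have hv := hall _ hx
    have hje : s + 1 + (j.toNat - (s + 1)) = j.toNat := by omega
    have hjl : j.toNat < q.length := by omega
    have hq1 : q[j.toNat]? = some (rest[j.toNat - (s + 1)]'hk2) := by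
      conv_lhs => rw [← hje]
      rw [← hidx (j.toNat - (s + 1)), List.getElem?_eq_getElem hk2]
    have hq2 : q[j.toNat]? = some (q[j.toNat]'hjl) := List.getElem?_eq_getElem hjl
    have heq : q[j.toNat]'hjl = rest[j.toNat - (s + 1)]'hk2 := Option.some.inj (hq2.symm.trans hq1)
    rw [heq]; exact hv

theorem A_loop (m : Int) (q : List Int) (hm : m ≤ (q.length : Int)) :
    ∀ (t : List Int) (s : Nat), q.drop s = t → ∀ r : Int,
    (PySem.List.enumerate t (s : Int)).foldl (fun res iv =>
      let isOK := (PySem.List.pyRange (iv.1 + 1) m 1).foldl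
        (fun ok j => if iv.2 > PySem.List.pyGetD q j 0 then false else ok) true
      if isOK then res + 1 else res) r = r + Cnt m s t := by
  intro t
  induction t with
  | nil => intro s _ r; simp [PySem.List.enumerate, Cnt]
  | cons v rest ih =>
    intro s hdrop r
    have hdrop' : q.drop (s + 1) = rest := by
      have := congrArg List.tail hdrop
      simpa [List.tail_drop] using this
    rw [PySem.List.enumerate_cons, List.foldl_cons]
    simp only
    rw [isOK_eq m q hm s v rest hdrop]
    have hcast : (s : Int) + 1 = ((s + 1 : Nat) : Int) := by push_cast; ring
    rw [hcast, ih (s + 1) hdrop']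
    simp only [Cnt, hcast]
    split_ifs <;> ring

-- ===== VERDICT (by name: the statement is the Claim_ definition above) =====
theorem solve_spec : Claim_equal_solve := by
  intro m q _ hpre
  unfold Spec_solve
  rcases hpre with h | hm
  · subst h; rfl
  · have hA : solve m q = Cnt m 0 q := by
      unfold solve
      have := A_loop m q hm q 0 (by simp) 0
      simpa using this
    have hB : solve_alt m q = Cnt m 0 q := by
      rw [solve_alt_eq_H]
      have := H_fst m q 0
      simpa using this
    rw [hA, hB]
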